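-- pv_equiv track=rewrite | github.com/sh95fit/CodingTest | 백준/Silver/2009. Minecraft/Minecraft.py | project_3d_to_2d
-- ===== SOURCE A (Python) =====
-- def project_3d_to_2d(M, n):
--     H = [[0] * n for _ in range(n)]
--     R = [[0] * n for _ in range(n)]
--     C = [[0] * n for _ in range(n)]
--
--     for i in range(n):
--         for j in range(n):
--             for k in range(n):
--                 if M[i][j][k] == 1:
--                     H[j][k] = 1
--                     R[i][k] = 1
--                     C[i][j] = 1
--
--     return H, R, C
-- ===== SOURCE B (Python) =====
-- def project_3d_to_2d(M, n):
--     rng = range(n)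
--     H = [[1 if any(M[i][j][k] == 1 for i in rng) else 0 for k in rng] for j in rng]
--     R = [[1 if any(M[i][j][k] == 1 for j in rng) else 0 for k in rng] for i in rng]
--     C = [[1 if any(M[i][j][k] == 1 for k in rng) else 0 for j in rng] for i in rng]
--     return H, R, C
-- ===== Notes on version B (the rewrite author's own statement) =====
-- stated objective: simpler
-- what changed: Replaced the single fused triple loop that mutates three zero-initialized matrices in place with three independent comprehensions, each building one projection plane directly via any() over the projected axis.
import Mathlib
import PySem

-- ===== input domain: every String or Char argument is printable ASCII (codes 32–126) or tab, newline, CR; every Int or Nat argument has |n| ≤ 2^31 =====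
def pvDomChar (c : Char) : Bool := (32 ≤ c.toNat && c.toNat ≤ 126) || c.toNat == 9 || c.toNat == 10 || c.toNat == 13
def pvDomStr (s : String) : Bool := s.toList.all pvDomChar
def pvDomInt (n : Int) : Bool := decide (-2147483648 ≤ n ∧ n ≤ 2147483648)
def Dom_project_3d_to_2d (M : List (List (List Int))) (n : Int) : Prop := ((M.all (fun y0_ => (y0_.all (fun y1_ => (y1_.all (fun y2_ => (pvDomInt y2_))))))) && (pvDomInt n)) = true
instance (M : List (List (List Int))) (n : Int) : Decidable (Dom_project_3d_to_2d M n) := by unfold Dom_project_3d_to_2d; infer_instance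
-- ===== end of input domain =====

-- B replaces A's single fused triple loop mutating three matrices with three
-- independent comprehensions, each building one projection plane via any(); objective: simpler.

-- ===== PORT A =====
-- shared total lookup M[i][j][k] (both Pythons use this exact expression; Pre_ keeps it in range)
def pvGet3 (M : List (List (List Int))) (i j k : Int) : Int :=
  PySem.List.pyGetD (PySem.List.pyGetD (PySem.List.pyGetD M i []) j []) k 0

def project_3d_to_2d (M : List (List (List Int))) (n : Int) : List (List Int) × List (List Int) × List (List Int) :=
  let H := (PySem.List.pyRange 0 n 1).map (fun _ => List.replicate n.toNat (0 : Int))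
  let R := (PySem.List.pyRange 0 n 1).map (fun _ => List.replicate n.toNat (0 : Int))
  let C := (PySem.List.pyRange 0 n 1).map (fun _ => List.replicate n.toNat (0 : Int))
  (PySem.List.pyRange 0 n 1).foldl (fun s i =>
    (PySem.List.pyRange 0 n 1).foldl (fun s j =>
      (PySem.List.pyRange 0 n 1).foldl (fun s k =>
        if pvGet3 M i j k = 1 then
          (PySem.List.pySetD s.1 j (PySem.List.pySetD (PySem.List.pyGetD s.1 j []) k 1),
           PySem.List.pySetD s.2.1 i (PySem.List.pySetD (PySem.List.pyGetD s.2.1 i []) k 1),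
           PySem.List.pySetD s.2.2 i (PySem.List.pySetD (PySem.List.pyGetD s.2.2 i []) j 1))
        else s) s) s) (H, R, C)

-- ===== PORT B =====
def project_3d_to_2d_alt (M : List (List (List Int))) (n : Int) : List (List Int) × List (List Int) × List (List Int) :=
  let rng := PySem.List.pyRange 0 n 1
  ((rng.map (fun j => rng.map (fun k => if rng.any (fun i => pvGet3 M i j k == 1) then (1 : Int) else 0))),
   (rng.map (fun i => rng.map (fun k => if rng.any (fun j => pvGet3 M i j k == 1) then (1 : Int) else 0))),
   (rng.map (fun i => rng.map (fun j => if rng.any (fun k => pvGet3 M i j k == 1) then (1 : Int) else 0))))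

-- ===== PRECONDITION & SPEC =====
-- Pre_ excludes exactly the inputs where Python A raises IndexError: some accessed M[i][j][k]
-- with i,j,k < n is missing (A scans all of them; B's any() may short-circuit before the bad index).
def Pre_project_3d_to_2d (M : List (List (List Int))) (n : Int) : Prop :=
  0 < n → (n ≤ (M.length : Int) ∧
    ∀ row ∈ M.take n.toNat, (n ≤ (row.length : Int) ∧
      ∀ sub ∈ row.take n.toNat, n ≤ (sub.length : Int)))
instance (M : List (List (List Int))) (n : Int) : Decidable (Pre_project_3d_to_2d M n) := by
  unfold Pre_project_3d_to_2d; infer_instance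

def pvWitness_project_3d_to_2d : List (List (List Int)) × Int :=
  ([[[1, 0], [0, 2]], [[0, 0], [5, 1]]], 2)

def Spec_project_3d_to_2d (M : List (List (List Int))) (n : Int) (out : List (List Int) × List (List Int) × List (List Int)) : Prop := out = project_3d_to_2d_alt M n
instance (M : List (List (List Int))) (n : Int) (out : List (List Int) × List (List Int) × List (List Int)) : Decidable (Spec_project_3d_to_2d M n out) := by unfold Spec_project_3d_to_2d; infer_instance

-- ===== CLAIM (what is proved, stated in full; the proofs are below) =====
def Claim_equal_project_3d_to_2d : Prop := ∀ (M : List (List (List Int))) (n : Int), Dom_project_3d_to_2d M n → Pre_project_3d_to_2d M n → Spec_project_3d_to_2d M n (project_3d_to_2d M n)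

-- ===== LEMMAS AND PROOFS =====

-- peek h j k = h[j][k] with defaults
def pvPeek (h : List (List Int)) (j k : Nat) : Int := (h.getD j []).getD k 0

-- one in-place write h[j][k] = 1 (Nat-indexed form of what port A does)
def pvUpd (h : List (List Int)) (j k : Nat) : List (List Int) := h.set j ((h.getD j []).set k 1)

theorem pvGetD_set_ne {α : Type} (l : List α) (a j : Nat) (r : α) (d : α) (h : a ≠ j) :
    (l.set a r).getD j d = l.getD j d := by
  simp [List.getD_eq_getElem?_getD, h]

theorem pvGetD_set_self {α : Type} (l : List α) (a : Nat) (r : α) (d : α) (h : a < l.length) :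
    (l.set a r).getD a d = r := by
  simp [List.getD_eq_getElem?_getD, h]

-- shape of a single write
theorem pvUpdShape (h : List (List Int)) (a b : Nat) :
    (pvUpd h a b).length = h.length ∧
    ∀ j : Nat, ((pvUpd h a b).getD j []).length = (h.getD j []).length := by
  constructor
  · simp [pvUpd]
  · intro j
    by_cases hj : a = j
    · subst hj
      by_cases hl : a < h.length
      · rw [pvUpd, pvGetD_set_self _ _ _ _ hl]; simp
      · rw [pvUpd, List.set_eq_of_length_le (by omega)]
    · rw [pvUpd, pvGetD_set_ne _ _ _ _ _ hj]

-- shape preservation of the write-fold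
theorem pvFoldShape {τ : Type} (L : List τ) (c : τ → Bool) (p q : τ → Nat) (h : List (List Int)) :
    (L.foldl (fun h t => if c t then pvUpd h (p t) (q t) else h) h).length = h.length ∧
    ∀ j : Nat, ((L.foldl (fun h t => if c t then pvUpd h (p t) (q t) else h) h).getD j []).length
      = (h.getD j []).length := by
  induction L generalizing h with
  | nil => exact ⟨rfl, fun _ => rfl⟩
  | cons t L ih =>
    have step : (if c t then pvUpd h (p t) (q t) else h).length = h.length ∧
        ∀ j : Nat, ((if c t then pvUpd h (p t) (q t) else h).getD j []).length = (h.getD j []).length := by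
      by_cases hc : c t
      · simpa [hc] using pvUpdShape h (p t) (q t)
      · simp [hc]
    obtain ⟨s1, s2⟩ := step
    obtain ⟨i1, i2⟩ := ih (if c t then pvUpd h (p t) (q t) else h)
    simp only [List.foldl_cons]
    exact ⟨i1.trans s1, fun j => (i2 j).trans (s2 j)⟩

-- main invariant: the value at a tracked in-range cell (j,k) after all writes
theorem pvFoldWrite {τ : Type} (L : List τ) (c : τ → Bool) (p q : τ → Nat) (h : List (List Int))
    (j k : Nat) (hj : j < h.length) (hk : k < (h.getD j []).length) :
    pvPeek (L.foldl (fun h t => if c t then pvUpd h (p t) (q t) else h) h) j k =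
      if L.any (fun t => c t && (p t == j) && (q t == k)) then 1 else pvPeek h j k := by
  induction L generalizing h with
  | nil => simp
  | cons t L ih =>
    have hstep : ((if c t then pvUpd h (p t) (q t) else h).length = h.length) ∧
        ∀ j' : Nat, ((if c t then pvUpd h (p t) (q t) else h).getD j' []).length = (h.getD j' []).length := by
      by_cases hc : c t
      · simpa [hc] using pvUpdShape h (p t) (q t)
      · simp [hc]
    have hj' : j < (if c t then pvUpd h (p t) (q t) else h).length := by rw [hstep.1]; exact hj
    have hk' : k < ((if c t then pvUpd h (p t) (q t) else h).getD j []).length := by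
      rw [hstep.2 j]; exact hk
    have peekstep : pvPeek (if c t then pvUpd h (p t) (q t) else h) j k =
        if c t && (p t == j) && (q t == k) then 1 else pvPeek h j k := by
      by_cases hc : c t
      · simp only [hc, if_true, Bool.true_and]
        by_cases hpj : p t = j
        · by_cases hqk : q t = k
          · rw [pvPeek, pvUpd, hpj, hqk, pvGetD_set_self _ _ _ _ (hpj ▸ hj)]
            rw [pvGetD_set_self _ _ _ _ (hqk ▸ hk)]
            simp
          · rw [pvPeek, pvUpd, hpj, pvGetD_set_self _ _ _ _ (hpj ▸ hj)]
            rw [pvGetD_set_ne _ _ _ _ _ hqk]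
            simp [hqk, pvPeek]
        · rw [pvPeek, pvUpd, pvGetD_set_ne _ _ _ _ _ hpj]
          simp [hpj, pvPeek]
      · simp [hc, pvPeek]
    simp only [List.foldl_cons, List.any_cons]
    rw [ih _ hj' hk', peekstep]
    by_cases h1 : (L.any (fun t => c t && (p t == j) && (q t == k))) = true
    · simp [h1]
    · simp only [h1, Bool.or_false]
      simp at h1
      simp

-- Nat-indexed normal forms of the two ports
def pvTriples (N : Nat) : List (Nat × Nat × Nat) :=
  (List.range N).flatMap (fun i => (List.range N).flatMap (fun j => (List.range N).map (fun k => (i, j, k))))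

def pvCond (M : List (List (List Int))) (t : Nat × Nat × Nat) : Bool :=
  pvGet3 M t.1 t.2.1 t.2.2 == 1

def pvH0 (N : Nat) : List (List Int) := (List.range N).map (fun _ => List.replicate N (0 : Int))

def pvFoldA (M : List (List (List Int))) (N : Nat) (p q : Nat × Nat × Nat → Nat) : List (List Int) :=
  (pvTriples N).foldl (fun h t => if pvCond M t then pvUpd h (p t) (q t) else h) (pvH0 N)

def pvMatB (N : Nat) (g : Nat → Nat → Bool) : List (List Int) :=
  (List.range N).map (fun a => (List.range N).map (fun b => if g a b then (1 : Int) else 0))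

-- a fold over the flattened triple list is the nested fold
theorem pvTriplesFold {α : Type} (N : Nat) (step : α → Nat × Nat × Nat → α) (a : α) :
    (pvTriples N).foldl step a =
      (List.range N).foldl (fun a i => (List.range N).foldl (fun a j =>
        (List.range N).foldl (fun a k => step a (i, j, k)) a) a) a := by
  simp only [pvTriples, List.foldl_flatMap, List.foldl_map]

-- specialized fold-splitting for A's concrete step, one level
theorem pvSplitA1 (M : List (List (List Int))) (i j : Nat) (l₃ : List Nat)
    (s : List (List Int) × List (List Int) × List (List Int)) :
    l₃.foldl (fun x (k : Nat) => if pvGet3 M ↑i ↑j ↑k = 1 then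
        (x.1.set j ((x.1.getD j []).set k 1),
         x.2.1.set i ((x.2.1.getD i []).set k 1),
         x.2.2.set i ((x.2.2.getD i []).set j 1)) else x) s =
      (l₃.foldl (fun a (k : Nat) => if pvGet3 M ↑i ↑j ↑k = 1 then a.set j ((a.getD j []).set k 1) else a) s.1,
       l₃.foldl (fun b (k : Nat) => if pvGet3 M ↑i ↑j ↑k = 1 then b.set i ((b.getD i []).set k 1) else b) s.2.1,
       l₃.foldl (fun c (k : Nat) => if pvGet3 M ↑i ↑j ↑k = 1 then c.set i ((c.getD i []).set j 1) else c) s.2.2) := by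
  induction l₃ generalizing s with
  | nil => rfl
  | cons k l₃ ih =>
    simp only [List.foldl_cons]
    rw [ih]
    by_cases hc : pvGet3 M ↑i ↑j ↑k = 1 <;> simp [hc]

-- two levels
theorem pvSplitA2 (M : List (List (List Int))) (i : Nat) (l₂ l₃ : List Nat)
    (s : List (List Int) × List (List Int) × List (List Int)) :
    l₂.foldl (fun x (j : Nat) => l₃.foldl (fun x (k : Nat) => if pvGet3 M ↑i ↑j ↑k = 1 then
        (x.1.set j ((x.1.getD j []).set k 1),
         x.2.1.set i ((x.2.1.getD i []).set k 1),
         x.2.2.set i ((x.2.2.getD i []).set j 1)) else x) x) s =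
      (l₂.foldl (fun a (j : Nat) => l₃.foldl (fun a (k : Nat) => if pvGet3 M ↑i ↑j ↑k = 1 then a.set j ((a.getD j []).set k 1) else a) a) s.1,
       l₂.foldl (fun b (j : Nat) => l₃.foldl (fun b (k : Nat) => if pvGet3 M ↑i ↑j ↑k = 1 then b.set i ((b.getD i []).set k 1) else b) b) s.2.1,
       l₂.foldl (fun c (j : Nat) => l₃.foldl (fun c (k : Nat) => if pvGet3 M ↑i ↑j ↑k = 1 then c.set i ((c.getD i []).set j 1) else c) c) s.2.2) := by
  induction l₂ generalizing s with
  | nil => rfl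
  | cons j l₂ ih =>
    simp only [List.foldl_cons]
    rw [pvSplitA1, ih]

-- three levels
theorem pvSplitA3 (M : List (List (List Int))) (l₁ l₂ l₃ : List Nat)
    (s : List (List Int) × List (List Int) × List (List Int)) :
    l₁.foldl (fun x (i : Nat) => l₂.foldl (fun x (j : Nat) => l₃.foldl (fun x (k : Nat) => if pvGet3 M ↑i ↑j ↑k = 1 then
        (x.1.set j ((x.1.getD j []).set k 1),
         x.2.1.set i ((x.2.1.getD i []).set k 1),
         x.2.2.set i ((x.2.2.getD i []).set j 1)) else x) x) x) s =
      (l₁.foldl (fun a (i : Nat) => l₂.foldl (fun a (j : Nat) => l₃.foldl (fun a (k : Nat) => if pvGet3 M ↑i ↑j ↑k = 1 then a.set j ((a.getD j []).set k 1) else a) a) a) s.1,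
       l₁.foldl (fun b (i : Nat) => l₂.foldl (fun b (j : Nat) => l₃.foldl (fun b (k : Nat) => if pvGet3 M ↑i ↑j ↑k = 1 then b.set i ((b.getD i []).set k 1) else b) b) b) s.2.1,
       l₁.foldl (fun c (i : Nat) => l₂.foldl (fun c (j : Nat) => l₃.foldl (fun c (k : Nat) => if pvGet3 M ↑i ↑j ↑k = 1 then c.set i ((c.getD i []).set j 1) else c) c) c) s.2.2) := by
  induction l₁ generalizing s with
  | nil => rfl
  | cons i l₁ ih =>
    simp only [List.foldl_cons]
    rw [pvSplitA2, ih]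

-- port A in Nat-indexed normal form
theorem pvAnorm (M : List (List (List Int))) (n : Int) :
    project_3d_to_2d M n =
      (pvFoldA M n.toNat (fun t => t.2.1) (fun t => t.2.2),
       pvFoldA M n.toNat (fun t => t.1) (fun t => t.2.2),
       pvFoldA M n.toNat (fun t => t.1) (fun t => t.2.1)) := by
  unfold project_3d_to_2d pvFoldA pvH0
  rw [PySem.List.pyRange_zero]
  simp only [List.foldl_map, List.map_map, Function.comp_def,
    PySem.List.pyGetD_natCast, PySem.List.pySetD_natCast]
  rw [pvSplitA3]
  simp only [pvTriplesFold, pvCond, pvUpd, beq_iff_eq]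

-- port B in Nat-indexed normal form
theorem pvBnorm (M : List (List (List Int))) (n : Int) :
    project_3d_to_2d_alt M n =
      (pvMatB n.toNat (fun j k => (List.range n.toNat).any (fun i => pvCond M (i, j, k))),
       pvMatB n.toNat (fun i k => (List.range n.toNat).any (fun j => pvCond M (i, j, k))),
       pvMatB n.toNat (fun i j => (List.range n.toNat).any (fun k => pvCond M (i, j, k)))) := by
  unfold project_3d_to_2d_alt pvMatB
  rw [PySem.List.pyRange_zero]
  simp only [List.map_map, List.any_map, Function.comp_def, pvCond]
  rfl

-- matrices agree if shapes agree and all in-range cells agree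
theorem pvMatEq (A B : List (List Int)) (N : Nat) (hA : A.length = N) (hB : B.length = N)
    (hrA : ∀ j, j < N → (A.getD j []).length = N) (hrB : ∀ j, j < N → (B.getD j []).length = N)
    (hcell : ∀ j, j < N → ∀ k, k < N → pvPeek A j k = pvPeek B j k) : A = B := by
  apply List.ext_getElem (by omega)
  intro j hj hj'
  apply List.ext_getElem
  · rw [← List.getD_eq_getElem A [] hj, ← List.getD_eq_getElem B [] hj']
    rw [hrA j (by omega), hrB j (by omega)]
  · intro k hk hk'
    have hjN : j < N := by omega
    have hkN : k < N := by
      have := hrA j hjN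
      rw [← List.getD_eq_getElem A [] hj] at hk
      omega
    have := hcell j hjN k hkN
    rw [pvPeek, pvPeek, List.getD_eq_getElem A [] hj, List.getD_eq_getElem B [] hj'] at this
    rw [List.getD_eq_getElem _ 0 hk, List.getD_eq_getElem _ 0 hk'] at this
    exact this

-- shape and initial contents of the zero matrix
theorem pvH0_len (N : Nat) : (pvH0 N).length = N := by simp [pvH0]

theorem pvH0_row (N j : Nat) (hj : j < N) : ((pvH0 N).getD j []).length = N := by
  simp [pvH0, List.getD_eq_getElem?_getD, hj]

theorem pvH0_peek (N j k : Nat) : pvPeek (pvH0 N) j k = 0 := by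
  by_cases hj : j < N <;>
    simp [pvPeek, pvH0, List.getD_eq_getElem?_getD, hj]

-- shape and contents of B's matrices
theorem pvMatB_len (N : Nat) (g : Nat → Nat → Bool) : (pvMatB N g).length = N := by simp [pvMatB]

theorem pvMatB_row (N : Nat) (g : Nat → Nat → Bool) (j : Nat) (hj : j < N) :
    ((pvMatB N g).getD j []).length = N := by
  simp [pvMatB, List.getD_eq_getElem?_getD, hj]

theorem pvMatB_peek (N : Nat) (g : Nat → Nat → Bool) (j k : Nat) (hj : j < N) (hk : k < N) :
    pvPeek (pvMatB N g) j k = if g j k then 1 else 0 := by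
  simp [pvPeek, pvMatB, List.getD_eq_getElem?_getD, hj, hk]

-- shape of A's folded matrices
theorem pvFoldA_len (M : List (List (List Int))) (N : Nat) (p q : Nat × Nat × Nat → Nat) :
    (pvFoldA M N p q).length = N := by
  rw [pvFoldA]
  exact (pvFoldShape (pvTriples N) (pvCond M) p q (pvH0 N)).1.trans (pvH0_len N)

theorem pvFoldA_row (M : List (List (List Int))) (N : Nat) (p q : Nat × Nat × Nat → Nat)
    (j : Nat) (hj : j < N) : ((pvFoldA M N p q).getD j []).length = N := by
  rw [pvFoldA]
  exact ((pvFoldShape (pvTriples N) (pvCond M) p q (pvH0 N)).2 j).trans (pvH0_row N j hj)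

-- cell values of A's folded matrices
theorem pvFoldA_cell (M : List (List (List Int))) (N : Nat) (p q : Nat × Nat × Nat → Nat)
    (j k : Nat) (hj : j < N) (hk : k < N) :
    pvPeek (pvFoldA M N p q) j k =
      if (pvTriples N).any (fun t => pvCond M t && (p t == j) && (q t == k)) then 1 else 0 := by
  rw [pvFoldA, pvFoldWrite (pvTriples N) (pvCond M) p q (pvH0 N) j k
    (by rw [pvH0_len]; exact hj) (by rw [pvH0_row N j hj]; exact hk), pvH0_peek]

-- the flattened any over all triples, restricted to one cell, per matrix
theorem pvAnyH (M : List (List (List Int))) (N j k : Nat) (hj : j < N) (hk : k < N) :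
    (pvTriples N).any (fun t => pvCond M t && (t.2.1 == j) && (t.2.2 == k)) =
      (List.range N).any (fun i => pvCond M (i, j, k)) := by
  rw [Bool.eq_iff_iff]
  simp only [pvTriples, List.any_eq_true, List.mem_flatMap, List.mem_map, List.mem_range]
  constructor
  · rintro ⟨t, ⟨i, hi, j', hj', k', hk', rfl⟩, h⟩
    simp only [Bool.and_eq_true, beq_iff_eq] at h
    obtain ⟨⟨hc, rfl⟩, rfl⟩ := h
    exact ⟨i, hi, hc⟩
  · rintro ⟨i, hi, h⟩
    exact ⟨(i, j, k), ⟨i, hi, j, hj, k, hk, rfl⟩, by simp [h]⟩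

theorem pvAnyR (M : List (List (List Int))) (N i k : Nat) (hi : i < N) (hk : k < N) :
    (pvTriples N).any (fun t => pvCond M t && (t.1 == i) && (t.2.2 == k)) =
      (List.range N).any (fun j => pvCond M (i, j, k)) := by
  rw [Bool.eq_iff_iff]
  simp only [pvTriples, List.any_eq_true, List.mem_flatMap, List.mem_map, List.mem_range]
  constructor
  · rintro ⟨t, ⟨i', hi', j', hj', k', hk', rfl⟩, h⟩
    simp only [Bool.and_eq_true, beq_iff_eq] at h
    obtain ⟨⟨hc, rfl⟩, rfl⟩ := h
    exact ⟨j', hj', hc⟩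
  · rintro ⟨j, hjN, h⟩
    exact ⟨(i, j, k), ⟨i, hi, j, hjN, k, hk, rfl⟩, by simp [h]⟩

theorem pvAnyC (M : List (List (List Int))) (N i j : Nat) (hi : i < N) (hj : j < N) :
    (pvTriples N).any (fun t => pvCond M t && (t.1 == i) && (t.2.1 == j)) =
      (List.range N).any (fun k => pvCond M (i, j, k)) := by
  rw [Bool.eq_iff_iff]
  simp only [pvTriples, List.any_eq_true, List.mem_flatMap, List.mem_map, List.mem_range]
  constructor
  · rintro ⟨t, ⟨i', hi', j', hj', k', hk', rfl⟩, h⟩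
    simp only [Bool.and_eq_true, beq_iff_eq] at h
    obtain ⟨⟨hc, rfl⟩, rfl⟩ := h
    exact ⟨k', hk', hc⟩
  · rintro ⟨k, hkN, h⟩
    exact ⟨(i, j, k), ⟨i, hi, j, hj, k, hkN, rfl⟩, by simp [h]⟩

-- one matrix of A equals the corresponding matrix of B
theorem pvMatA_eq_matB (M : List (List (List Int))) (N : Nat) (p q : Nat × Nat × Nat → Nat)
    (g : Nat → Nat → Bool)
    (hany : ∀ a b : Nat, a < N → b < N →
      (pvTriples N).any (fun t => pvCond M t && (p t == a) && (q t == b)) = g a b) :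
    pvFoldA M N p q = pvMatB N g := by
  apply pvMatEq _ _ N (pvFoldA_len M N p q) (pvMatB_len N g)
    (fun j hj => pvFoldA_row M N p q j hj) (fun j hj => pvMatB_row N g j hj)
  intro j hj k hk
  rw [pvFoldA_cell M N p q j k hj hk, pvMatB_peek N g j k hj hk, hany j k hj hk]

theorem project_3d_to_2d_spec : Claim_equal_project_3d_to_2d := by
  intro M n _ _
  unfold Spec_project_3d_to_2d
  rw [pvAnorm, pvBnorm]
  refine Prod.ext ?_ (Prod.ext ?_ ?_) <;> dsimp only
  · exact pvMatA_eq_matB M n.toNat _ _ _ (fun a b ha hb => pvAnyH M n.toNat a b ha hb)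
  · exact pvMatA_eq_matB M n.toNat _ _ _ (fun a b ha hb => pvAnyR M n.toNat a b ha hb)
  · exact pvMatA_eq_matB M n.toNat _ _ _ (fun a b ha hb => pvAnyC M n.toNat a b ha hb)
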